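-- pv_equiv track=rewrite | github.com/smlfg/typotuner | typotuner/qwertz.py | _build_symmetric_neighbors
-- ===== SOURCE A (Python) =====
-- def _build_symmetric_neighbors(raw: dict[int, set[int]]) -> dict[int, set[int]]:
--     """Ensure the neighbor map is fully symmetric."""
--     result: dict[int, set[int]] = {k: set(v) for k, v in raw.items()}
--     for key, neighbors in raw.items():
--         for neighbor in neighbors:
--             if neighbor not in result:
--                 result[neighbor] = set()
--             result[neighbor].add(key)
--     return result
-- ===== SOURCE B (Python) =====
-- def _build_symmetric_neighbors(raw: dict[int, set[int]]) -> dict[int, set[int]]: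
--     """Ensure the neighbor map is fully symmetric."""
--     # Node universe: raw's keys, then every neighbor, first occurrence first.
--     nodes = dict.fromkeys(list(raw) + [n for vs in raw.values() for n in vs])
--     # Each node's set: its forward neighbors plus every key whose set mentions it.
--     return {node: set(raw.get(node, ())).union(
--                 k for k, vs in raw.items() if node in vs)
--             for node in nodes}
-- ===== Notes on version B (the rewrite author's own statement) =====
-- stated objective: alternative
-- what changed: A symmetrizes by one pass over all edges, mutating a copied map in place to insert reverse edges; B never accumulates reverse edges at all: it computes the node universe up front with dict.fromkeys and then, for each node, rescans raw's items to collect the keys that mention it, unioning them with the node's forward set.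
import Mathlib
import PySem

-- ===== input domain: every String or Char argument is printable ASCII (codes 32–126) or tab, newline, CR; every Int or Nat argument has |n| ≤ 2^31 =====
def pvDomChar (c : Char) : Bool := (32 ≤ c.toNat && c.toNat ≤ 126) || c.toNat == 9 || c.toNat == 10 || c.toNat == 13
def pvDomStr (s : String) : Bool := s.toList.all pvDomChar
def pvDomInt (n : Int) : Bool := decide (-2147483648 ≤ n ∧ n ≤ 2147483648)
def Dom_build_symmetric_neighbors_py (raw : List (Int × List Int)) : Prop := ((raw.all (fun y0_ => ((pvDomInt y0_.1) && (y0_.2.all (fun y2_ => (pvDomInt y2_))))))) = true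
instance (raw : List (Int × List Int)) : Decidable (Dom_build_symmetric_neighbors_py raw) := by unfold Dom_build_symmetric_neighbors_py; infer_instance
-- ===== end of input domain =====

-- B replaces A's edge pass that mutates a copied map by a universe-then-rescan strategy: it
-- never accumulates reverse edges, instead rescanning raw per node for the keys mentioning it;
-- objective: alternative algorithm (B is O(V*E), not faster).

-- ===== PORT A =====
def build_symmetric_neighbors_py (raw : List (Int × List Int)) : List (Int × List Int) :=
  -- result = {k: set(v) for k, v in raw.items()}
  let result : PySem.Dict Int (List Int) :=
    raw.foldl (fun d kv => d.insert kv.1 (PySem.Set.ofList kv.2)) PySem.Dict.empty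
  -- for key, neighbors in raw.items(): for neighbor in neighbors: …
  let result :=
    raw.foldl (fun res kv =>
      kv.2.foldl (fun res n =>
        -- if neighbor not in result: result[neighbor] = set()
        let res := if res.contains n then res else res.insert n ([] : List Int)
        -- result[neighbor].add(key)  (in-place set add = modify at the key)
        res.modify n [] (fun s => PySem.Set.add s kv.1)) res) result
  result.items

-- ===== PORT B =====
def build_symmetric_neighbors_py_alt (raw : List (Int × List Int)) : List (Int × List Int) :=
  let rawD : PySem.Dict Int (List Int) := PySem.Dict.mk raw
  -- nodes = dict.fromkeys(list(raw) + [n for vs in raw.values() for n in vs])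
  let nodes : List Int := PySem.List.dedup (raw.map Prod.fst ++ raw.flatMap (fun kv => kv.2))
  -- {node: set(raw.get(node, ())).union(k for k, vs in raw.items() if node in vs) for node in nodes}
  nodes.map (fun node =>
    (node, PySem.Set.union (PySem.Set.ofList (rawD.getD node []))
             ((raw.filter (fun kv => kv.2.contains node)).map Prod.fst)))

-- ===== PRECONDITION & SPEC =====
-- Pre_ excludes association lists with duplicate keys: those do not represent any Python
-- dict[int, set[int]], so Python's A never receives them (it returns on every real dict).
def Pre_build_symmetric_neighbors_py (raw : List (Int × List Int)) : Prop :=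
  (raw.map Prod.fst).Nodup
instance (raw : List (Int × List Int)) : Decidable (Pre_build_symmetric_neighbors_py raw) := by
  unfold Pre_build_symmetric_neighbors_py; infer_instance

def pvWitness_build_symmetric_neighbors_py : (List (Int × List Int)) := [(1, [2]), (2, [1, 3])]

def Spec_build_symmetric_neighbors_py (raw : List (Int × List Int)) (out : List (Int × List Int)) : Prop := out = build_symmetric_neighbors_py_alt raw
instance (raw : List (Int × List Int)) (out : List (Int × List Int)) : Decidable (Spec_build_symmetric_neighbors_py raw out) := by unfold Spec_build_symmetric_neighbors_py; infer_instance

-- ===== CLAIM (what is proved, stated in full; the proofs are below) =====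
def Claim_equal_build_symmetric_neighbors_py : Prop := ∀ (raw : List (Int × List Int)), Dom_build_symmetric_neighbors_py raw → Pre_build_symmetric_neighbors_py raw → Spec_build_symmetric_neighbors_py raw (build_symmetric_neighbors_py raw)

-- ===== LEMMAS AND PROOFS =====

-- the flattened edge list (key, neighbor) A's two nested loops traverse
def pvEdges (raw : List (Int × List Int)) : List (Int × Int) :=
  raw.flatMap (fun kv => kv.2.map (fun n => (kv.1, n)))

-- A's inner body (conditional empty insert, then in-place add) IS a modify at the key
theorem pvStepA_eq_modify (d : PySem.Dict Int (List Int)) (n k : Int) :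
    (if d.contains n then d else d.insert n ([] : List Int)).modify n []
        (fun s => PySem.Set.add s k)
      = d.modify n [] (fun s => PySem.Set.add s k) := by
  by_cases h : d.contains n = true
  · simp [h]
  · rw [if_neg h]
    have hg : d.get? n = none := by
      have := PySem.Dict.contains_eq_isSome_get? d n
      rw [eq_false_of_ne_true h] at this
      exact Option.not_isSome_iff_eq_none.mp (by simp [← this])
    simp [PySem.Dict.modify, PySem.Dict.getD, PySem.Dict.get?_insert_self,
      PySem.Dict.insert_insert_self, hg]

-- A's two nested key/neighbor loops are a single fold over the edge list
theorem pvNestedA (raw : List (Int × List Int)) (d : PySem.Dict Int (List Int)) :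
    raw.foldl (fun res kv =>
        kv.2.foldl (fun res n => res.modify n [] (fun s => PySem.Set.add s kv.1)) res) d
      = (pvEdges raw).foldl (fun d e => d.modify e.2 [] (fun s => PySem.Set.add s e.1)) d := by
  simp [pvEdges, List.foldl_flatMap, List.foldl_map]

-- value at v after a modify-at-snd fold: fold the matching edges' keys onto the old value
theorem pvGetD_foldl_modify (g : List Int → Int → List Int) (E : List (Int × Int))
    (d : PySem.Dict Int (List Int)) (v : Int) :
    ((E.foldl (fun d e => d.modify e.2 [] (fun s => g s e.1)) d).getD v [])
      = (E.filter (fun e => e.2 == v)).foldl (fun s e => g s e.1) (d.getD v []) := by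
  induction E generalizing d with
  | nil => rfl
  | cons e E ih =>
      by_cases h : e.2 = v
      · subst h
        simp only [List.foldl_cons, ih, PySem.Dict.getD_modify_self]
        simp
      · have hb : (e.2 == v) = false := by simp [h]
        simp only [List.foldl_cons, ih]
        rw [PySem.Dict.getD_modify_of_ne _ _ _ (Ne.symm h)]
        simp [hb]

-- the initial copy {k: set(v) for k, v in raw.items()} under unique keys
theorem pvInit_eq_mk (raw : List (Int × List Int)) (h : (raw.map Prod.fst).Nodup) :
    raw.foldl (fun d kv => d.insert kv.1 (PySem.Set.ofList kv.2)) PySem.Dict.empty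
      = PySem.Dict.mk (raw.map (fun kv => (kv.1, PySem.Set.ofList kv.2))) := by
  apply PySem.Dict.ext
  rw [PySem.Dict.items_foldl_insert_fresh raw Prod.fst (fun kv => PySem.Set.ofList kv.2)
    PySem.Dict.empty (fun a _ => rfl) h]
  rfl

-- lookup in the value-mapped dict is the mapped lookup (first match aligns)
theorem pvGetD_mk_map (raw : List (Int × List Int)) (n : Int) :
    (PySem.Dict.mk (raw.map (fun kv => (kv.1, PySem.Set.ofList kv.2)))).getD n []
      = PySem.Set.ofList ((PySem.Dict.mk raw).getD n []) := by
  induction raw with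
  | nil => rfl
  | cons kv raw ih =>
      obtain ⟨k, v⟩ := kv
      simp only [List.map_cons, PySem.Dict.getD, PySem.Dict.get?_mk_cons]
      by_cases h : (k == n) = true
      · simp [h]
      · simp only [h, Bool.false_eq_true, if_false]
        exact ih

-- folding add over a constant list collapses to (at most) one add
theorem pvFoldlAddConst (l : List Int) (s : PySem.Set Int) (x : Int) :
    List.foldl PySem.Set.add s (l.map (fun _ => x))
      = if l.isEmpty then s else PySem.Set.add s x := by
  induction l generalizing s with
  | nil => rfl
  | cons a l ih =>
      simp only [List.map_cons, List.foldl_cons, ih, List.isEmpty_cons]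
      cases l with
      | nil => rfl
      | cons b l => simp

-- B's universe equals A's key list
theorem pvUniv (raw : List (Int × List Int)) (h : (raw.map Prod.fst).Nodup) :
    PySem.List.dedup (raw.map Prod.fst ++ raw.flatMap (fun kv => kv.2))
      = PySem.Set.update (raw.map Prod.fst) ((pvEdges raw).map Prod.snd) := by
  have hmap : (pvEdges raw).map Prod.snd = raw.flatMap (fun kv => kv.2) := by
    simp [pvEdges, List.map_flatMap, List.map_map]
  rw [hmap, PySem.List.dedup_eq_ofList, PySem.Set.ofList_append,
    PySem.Set.ofList_eq_self_of_nodup (raw.map Prod.fst) h]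

-- folding add over the keys of the edges hitting n equals folding add over the keys
-- of the raw entries mentioning n (repeated keys collapse, each key appears grouped)
theorem pvValue (raw : List (Int × List Int)) (n : Int) (s : PySem.Set Int) :
    List.foldl PySem.Set.add s (((pvEdges raw).filter (fun e => e.2 == n)).map Prod.fst)
      = List.foldl PySem.Set.add s ((raw.filter (fun kv => kv.2.contains n)).map Prod.fst) := by
  induction raw generalizing s with
  | nil => rfl
  | cons kv raw ih =>
      have hE : pvEdges (kv :: raw) = kv.2.map (fun n' => (kv.1, n')) ++ pvEdges raw := by
        simp [pvEdges]
      have hhead : ((kv.2.map (fun n' => (kv.1, n'))).filter (fun e => e.2 == n)).map Prod.fst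
          = (kv.2.filter (fun n' => n' == n)).map (fun _ => kv.1) := by
        rw [List.filter_map, List.map_map]
        rfl
      rw [hE, List.filter_append, List.map_append, List.foldl_append, hhead,
        pvFoldlAddConst, List.filter_cons]
      by_cases hc : n ∈ kv.2
      · have h1 : (kv.2.filter (fun n' => n' == n)).isEmpty = false := by
          simp only [List.isEmpty_eq_false_iff, ne_eq, List.filter_eq_nil_iff]
          push Not
          exact ⟨n, hc, by simp⟩
        have h2 : kv.2.contains n = true := List.elem_eq_true_of_mem hc
        simp only [h1, Bool.false_eq_true, if_false, if_pos h2, List.map_cons, List.foldl_cons]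
        exact ih _
      · have h1 : (kv.2.filter (fun n' => n' == n)).isEmpty = true := by
          simp only [List.isEmpty_iff, List.filter_eq_nil_iff]
          intro a ha hb
          exact hc ((by simpa using hb : a = n) ▸ ha)
        simp only [h1, if_true]
        rw [if_neg (by simpa using hc : ¬ kv.2.contains n = true)]
        exact ih s

theorem build_symmetric_neighbors_py_spec_aux (raw : List (Int × List Int))
    (hpre : Pre_build_symmetric_neighbors_py raw) :
    build_symmetric_neighbors_py raw = build_symmetric_neighbors_py_alt raw := by
  unfold build_symmetric_neighbors_py build_symmetric_neighbors_py_alt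
  unfold Pre_build_symmetric_neighbors_py at hpre
  simp only [pvStepA_eq_modify]
  rw [pvNestedA, pvInit_eq_mk raw hpre]
  set E := pvEdges raw with hE
  set d0 := PySem.Dict.mk (raw.map (fun kv => (kv.1, PySem.Set.ofList kv.2))) with hd0
  set DA := E.foldl (fun d e => d.modify e.2 [] (fun s => PySem.Set.add s e.1)) d0 with hDA
  have hkeys0 : d0.keys = raw.map Prod.fst := by
    rw [hd0, PySem.Dict.keys_mk, List.map_map]; rfl
  have hkeysA : DA.keys = PySem.Set.update (raw.map Prod.fst) (E.map Prod.snd) := by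
    rw [hDA, PySem.Dict.keys_foldl_modify_key E Prod.snd [] (fun _ e => fun s => PySem.Set.add s e.1), hkeys0]
  have hnodupA : DA.keys.Nodup := by
    rw [hDA]
    exact PySem.Dict.nodup_keys_foldl_modify_key E Prod.snd []
      (fun _ e => fun s => PySem.Set.add s e.1) d0 (by rw [hkeys0]; exact hpre)
  rw [PySem.Dict.items_eq_map_keys DA hnodupA [], hkeysA]
  have hu := pvUniv raw hpre
  rw [← hE] at hu
  rw [hu]
  apply List.map_congr_left
  intro n _
  have hvalA : DA.getD n []
      = List.foldl PySem.Set.add (PySem.Set.ofList ((PySem.Dict.mk raw).getD n []))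
          ((E.filter (fun e => e.2 == n)).map Prod.fst) := by
    rw [hDA, pvGetD_foldl_modify (fun s k => PySem.Set.add s k) E d0 n, hd0, pvGetD_mk_map,
      List.foldl_map]
  rw [hvalA, hE, pvValue raw n]
  simp [PySem.Set.union, PySem.Set.update, List.foldl_map]

-- ===== VERDICT (by name: the statement is the Claim_ definition above) =====
theorem build_symmetric_neighbors_py_spec : Claim_equal_build_symmetric_neighbors_py := by
  intro raw _ hpre
  exact build_symmetric_neighbors_py_spec_aux raw hpre
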